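-- pv_equiv track=rewrite | github.com/nakulkrish/resume-parser-devops | ResumeParser.py | predict_role
-- ===== SOURCE A (Python) =====
-- DOMAIN_ROLES = {
--     'Computer Science': {'python', 'machine learning', 'java', 'sql', 'web development', 'aws'},
--     'Mechanical Engineer': {'solidworks', 'autocad', 'thermodynamics', 'hvac', 'fea', 'cam'},
--     'Electrical Engineer': {'matlab', 'arduino', 'circuit', 'simulink', 'vhdl', 'electronics'},
--     'Civil Engineer': {'staad pro', 'etabs', 'revit', 'civil 3d', 'site engineering', 'autocad civil'},
--     'Biotech / Pharma': {'cell culture', 'pcr', 'genomics', 'clinical trials'},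
--     'Business Analyst / Manager': {'finance', 'marketing', 'project management', 'business analysis'},
--     'Lawyer / Legal Professional': {
--         'litigation', 'contract law', 'corporate law', 'intellectual property',
--         'criminal law', 'civil law', 'legal research', 'legal writing', 'arbitration'
--     },
--     'Doctor / Medical Professional': {
--         'mbbs', 'md', 'residency', 'clinical', 'diagnosis', 'surgery', 'medical practice', 'treatment'
--     }
-- }
--
-- def predict_role(skills):
--     skill_set = set(skills)
--     role_scores = {}
--     for domain, keywords in DOMAIN_ROLES.items():
--         match_count = len(skill_set & keywords)
--         # Bonus weight if unique civil terms are present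
--         if domain == "Civil Engineer":
--             for civil_term in ['staad pro', 'etabs', 'revit', 'civil 3d', 'site engineering', 'geotechnical']:
--                 if civil_term in skill_set:
--                     match_count += 2  # give weight
--         role_scores[domain] = match_count
--     best_match = max(role_scores, key=role_scores.get)
--     return best_match
-- ===== SOURCE B (Python) =====
-- DOMAIN_ROLES = {
--     'Computer Science': {'python', 'machine learning', 'java', 'sql', 'web development', 'aws'},
--     'Mechanical Engineer': {'solidworks', 'autocad', 'thermodynamics', 'hvac', 'fea', 'cam'},
--     'Electrical Engineer': {'matlab', 'arduino', 'circuit', 'simulink', 'vhdl', 'electronics'},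
--     'Civil Engineer': {'staad pro', 'etabs', 'revit', 'civil 3d', 'site engineering', 'autocad civil'},
--     'Biotech / Pharma': {'cell culture', 'pcr', 'genomics', 'clinical trials'},
--     'Business Analyst / Manager': {'finance', 'marketing', 'project management', 'business analysis'},
--     'Lawyer / Legal Professional': {
--         'litigation', 'contract law', 'corporate law', 'intellectual property',
--         'criminal law', 'civil law', 'legal research', 'legal writing', 'arbitration'
--     },
--     'Doctor / Medical Professional': {
--         'mbbs', 'md', 'residency', 'clinical', 'diagnosis', 'surgery', 'medical practice', 'treatment'
--     }
-- }
--
-- # Inverted index: each base keyword -> its owning domain (keywords are disjoint across domains).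
-- _INVERTED = {kw: domain for domain, kws in DOMAIN_ROLES.items() for kw in kws}
--
-- _CIVIL_BONUS = ['staad pro', 'etabs', 'revit', 'civil 3d', 'site engineering', 'geotechnical']
--
--
-- def predict_role(skills):
--     dedup = list(dict.fromkeys(skills))
--     role_scores = {domain: 0 for domain in DOMAIN_ROLES}
--     for domain in [_INVERTED[s] for s in dedup if s in _INVERTED]:
--         role_scores[domain] += 1
--     for term in _CIVIL_BONUS:
--         if term in dedup:
--             role_scores['Civil Engineer'] += 2
--     return max(role_scores, key=role_scores.get)
-- ===== Notes on version B (the rewrite author's own statement) =====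
-- stated objective: alternative
-- what changed: A intersects the deduplicated skill set with each domain's keyword set per domain; B builds a single inverted index (keyword -> owning domain, keywords are disjoint) once and scores with one dict lookup per distinct skill, keeping the same zero-initialized insertion-ordered score dict, the same Civil bonus list, and the same first-maximal tie-break.
import Mathlib
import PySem

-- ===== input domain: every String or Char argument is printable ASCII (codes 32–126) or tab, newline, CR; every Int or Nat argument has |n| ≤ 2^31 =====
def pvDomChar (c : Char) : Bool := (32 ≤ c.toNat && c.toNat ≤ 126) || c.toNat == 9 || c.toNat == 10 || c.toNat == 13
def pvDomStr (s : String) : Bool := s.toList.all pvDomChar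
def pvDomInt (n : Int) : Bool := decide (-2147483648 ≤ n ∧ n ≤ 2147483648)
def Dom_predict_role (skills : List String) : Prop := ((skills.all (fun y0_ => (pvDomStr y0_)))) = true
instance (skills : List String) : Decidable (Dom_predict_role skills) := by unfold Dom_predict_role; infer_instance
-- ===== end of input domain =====

-- B replaces A's per-domain set-intersection scan with an inverted index (keyword -> owning domain,
-- the keywords are disjoint across domains) built once, scoring each distinct skill by one lookup;
-- same return value including the first-maximal tie-break (objective: alternative).

-- ===== PORT A =====
-- DOMAIN_ROLES as an insertion-ordered association list; the Python values are sets of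
-- distinct string literals, kept here as the (duplicate-free) literal lists.
def pvDOMAIN_ROLES : List (String × List String) := [
  ("Computer Science", ["python", "machine learning", "java", "sql", "web development", "aws"]),
  ("Mechanical Engineer", ["solidworks", "autocad", "thermodynamics", "hvac", "fea", "cam"]),
  ("Electrical Engineer", ["matlab", "arduino", "circuit", "simulink", "vhdl", "electronics"]),
  ("Civil Engineer", ["staad pro", "etabs", "revit", "civil 3d", "site engineering", "autocad civil"]),
  ("Biotech / Pharma", ["cell culture", "pcr", "genomics", "clinical trials"]),
  ("Business Analyst / Manager", ["finance", "marketing", "project management", "business analysis"]),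
  ("Lawyer / Legal Professional", ["litigation", "contract law", "corporate law", "intellectual property", "criminal law", "civil law", "legal research", "legal writing", "arbitration"]),
  ("Doctor / Medical Professional", ["mbbs", "md", "residency", "clinical", "diagnosis", "surgery", "medical practice", "treatment"])]

-- max(role_scores, key=role_scores.get): first key with maximal value, in insertion order;
-- role_scores always carries the 8 domains as keys, so max never sees an empty dict (.getD "" is dead).
def predict_role (skills : List String) : String :=
  let skill_set : PySem.Set String := PySem.Set.ofList skills
  let role_scores : PySem.Dict String Int :=
    pvDOMAIN_ROLES.foldl (fun rs p =>
      let match_count : Int := PySem.Set.len (PySem.Set.inter skill_set p.2)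
      let match_count : Int :=
        if p.1 == "Civil Engineer" then
          ["staad pro", "etabs", "revit", "civil 3d", "site engineering", "geotechnical"].foldl
            (fun mc civil_term => if PySem.Set.contains skill_set civil_term then mc + 2 else mc)
            match_count
        else match_count
      rs.insert p.1 match_count) PySem.Dict.empty
  (PySem.List.max? role_scores.keys (fun k => role_scores.getD k 0)).getD ""

-- ===== PORT B =====
-- _INVERTED = {kw: domain for domain, kws in DOMAIN_ROLES.items() for kw in kws}
def pvINVERTED : PySem.Dict String String :=
  pvDOMAIN_ROLES.foldl (fun d p => p.2.foldl (fun d kw => d.insert kw p.1) d) PySem.Dict.empty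

def pvCIVIL_BONUS : List String :=
  ["staad pro", "etabs", "revit", "civil 3d", "site engineering", "geotechnical"]

def predict_role_alt (skills : List String) : String :=
  let dedup := PySem.List.dedup skills
  let role_scores : PySem.Dict String Int :=
    pvDOMAIN_ROLES.foldl (fun rs p => rs.insert p.1 0) PySem.Dict.empty
  -- for domain in [_INVERTED[s] for s in dedup if s in _INVERTED]: role_scores[domain] += 1
  let role_scores :=
    (dedup.filterMap (fun s => pvINVERTED.get? s)).foldl
      (fun rs domain => rs.modify domain 0 (· + 1)) role_scores
  let role_scores :=
    pvCIVIL_BONUS.foldl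
      (fun rs term => if dedup.contains term then rs.modify "Civil Engineer" 0 (· + 2) else rs)
      role_scores
  (PySem.List.max? role_scores.keys (fun k => role_scores.getD k 0)).getD ""

-- ===== PRECONDITION & SPEC =====
def Spec_predict_role (skills : List String) (out : String) : Prop := out = predict_role_alt skills
instance (skills : List String) (out : String) : Decidable (Spec_predict_role skills out) := by unfold Spec_predict_role; infer_instance

-- ===== CLAIM (what is proved, stated in full; the proofs are below) =====
def Claim_equal_predict_role : Prop := ∀ (skills : List String), Dom_predict_role skills → Spec_predict_role skills (predict_role skills)

-- ===== LEMMAS AND PROOFS =====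

def pvALLKW : List String := ["python", "machine learning", "java", "sql", "web development", "aws", "solidworks", "autocad", "thermodynamics", "hvac", "fea", "cam", "matlab", "arduino", "circuit", "simulink", "vhdl", "electronics", "staad pro", "etabs", "revit", "civil 3d", "site engineering", "autocad civil", "cell culture", "pcr", "genomics", "clinical trials", "finance", "marketing", "project management", "business analysis", "litigation", "contract law", "corporate law", "intellectual property", "criminal law", "civil law", "legal research", "legal writing", "arbitration", "mbbs", "md", "residency", "clinical", "diagnosis", "surgery", "medical practice", "treatment"]

def pvDOMAINS : List String := ["Computer Science", "Mechanical Engineer", "Electrical Engineer", "Civil Engineer", "Biotech / Pharma", "Business Analyst / Manager", "Lawyer / Legal Professional", "Doctor / Medical Professional"]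

-- A's per-domain score expression, and A's score dict, named for the proofs.
def pvAval (S : List String) (p : String × List String) : Int :=
  if p.1 == "Civil Engineer" then
    ["staad pro", "etabs", "revit", "civil 3d", "site engineering", "geotechnical"].foldl
      (fun mc civil_term => if PySem.Set.contains S civil_term then mc + 2 else mc)
      (PySem.Set.len (PySem.Set.inter S p.2))
  else PySem.Set.len (PySem.Set.inter S p.2)

def pvScoresA (S : List String) : PySem.Dict String Int :=
  pvDOMAIN_ROLES.foldl (fun rs p => rs.insert p.1 (pvAval S p)) PySem.Dict.empty

-- B's score dict, in stages.
def pvScores0 : PySem.Dict String Int := pvDOMAIN_ROLES.foldl (fun rs p => rs.insert p.1 0) PySem.Dict.empty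

def pvScores1 (S : List String) : PySem.Dict String Int :=
  (S.filterMap (fun s => pvINVERTED.get? s)).foldl (fun rs domain => rs.modify domain 0 (· + 1)) pvScores0

def pvScores2 (S : List String) : PySem.Dict String Int :=
  pvCIVIL_BONUS.foldl (fun rs term => if S.contains term then rs.modify "Civil Engineer" 0 (· + 2) else rs) (pvScores1 S)

set_option maxRecDepth 20000 in
set_option maxHeartbeats 2000000 in
theorem pv_inv_lit : pvINVERTED = PySem.Dict.mk (pvDOMAIN_ROLES.flatMap (fun p => p.2.map (fun kw => (kw, p.1)))) := by decide

theorem pv_allkw1 : (pvDOMAIN_ROLES.flatMap (fun p => p.2.map (fun kw => (kw, p.1)))).map (fun x => x.1) = pvALLKW := by decide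

theorem pv_allkw2 : pvDOMAIN_ROLES.flatMap (fun p => p.2) = pvALLKW := by decide

-- pvINVERTED looks up s to d exactly when s is one of d's base keywords (keywords are disjoint).
set_option maxRecDepth 20000 in
set_option maxHeartbeats 4000000 in
theorem pv_get_inv (s : String) (d : String) (K : List String) (h : (d, K) ∈ pvDOMAIN_ROLES) :
    (pvINVERTED.get? s = some d) ↔ s ∈ K := by
  by_cases hs : s ∈ pvALLKW
  · simp only [pvDOMAIN_ROLES, List.mem_cons, Prod.mk.injEq, List.not_mem_nil, or_false] at h
    simp only [pvALLKW, List.mem_cons, List.not_mem_nil, or_false] at hs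
    rcases h with ⟨rfl, rfl⟩|⟨rfl, rfl⟩|⟨rfl, rfl⟩|⟨rfl, rfl⟩|⟨rfl, rfl⟩|⟨rfl, rfl⟩|⟨rfl, rfl⟩|⟨rfl, rfl⟩ <;>
      (rcases hs with rfl|rfl|rfl|rfl|rfl|rfl|rfl|rfl|rfl|rfl|rfl|rfl|rfl|rfl|rfl|rfl|rfl|rfl|rfl|rfl|rfl|rfl|rfl|rfl|rfl|rfl|rfl|rfl|rfl|rfl|rfl|rfl|rfl|rfl|rfl|rfl|rfl|rfl|rfl|rfl|rfl|rfl|rfl|rfl|rfl|rfl|rfl|rfl|rfl <;> decide)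
  · have hnone : pvINVERTED.get? s = none := by
      rw [PySem.Dict.get?_eq_none_iff_contains, pv_inv_lit, PySem.Dict.contains_mk, Bool.eq_false_iff]
      intro hc
      obtain ⟨p, hp, hps⟩ := List.any_eq_true.mp hc
      have hmem : s ∈ (pvDOMAIN_ROLES.flatMap (fun p => p.2.map (fun kw => (kw, p.1)))).map (fun x => x.1) :=
        List.mem_map.mpr ⟨p, hp, by simpa using hps⟩
      rw [pv_allkw1] at hmem
      exact hs hmem
    rw [hnone]
    constructor
    · intro hx; exact absurd hx (by simp)
    · intro hK
      have hmem : s ∈ pvDOMAIN_ROLES.flatMap (fun p => p.2) := List.mem_flatMap.mpr ⟨(d, K), h, hK⟩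
      rw [pv_allkw2] at hmem
      exact absurd hmem hs

theorem pv_inv_val_mem (s x : String) (h : pvINVERTED.get? s = some x) : x ∈ pvDOMAINS := by
  rw [pv_inv_lit] at h
  obtain ⟨p, hp, hpx⟩ := Option.map_eq_some_iff.mp h
  have hmem := List.mem_of_find?_eq_some hp
  have hall : ∀ p ∈ pvDOMAIN_ROLES.flatMap (fun p => p.2.map (fun kw => (kw, p.1))), p.2 ∈ pvDOMAINS := by decide
  exact hpx ▸ hall p hmem

theorem pv_set_update_id (s : PySem.Set String) (xs : List String)
    (h : ∀ x ∈ xs, s.contains x = true) : PySem.Set.update s xs = s := by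
  induction xs generalizing s with
  | nil => rfl
  | cons x xs ih =>
    have hx : PySem.Set.add s x = s := by
      simp only [PySem.Set.add, h x (List.mem_cons_self), if_true]
    simp only [PySem.Set.update, List.foldl_cons, hx]
    exact ih s (fun y hy => h y (List.mem_cons_of_mem _ hy))

-- |S ∩ K_d| counted on A's side equals the number of inverted-index hits for d on B's side.
set_option maxRecDepth 20000 in
set_option maxHeartbeats 2000000 in
theorem pv_count_inter (S : List String) (d : String) (K : List String) (h : (d, K) ∈ pvDOMAIN_ROLES) :
    PySem.Set.len (PySem.Set.inter S K) = ((S.filterMap (fun s => pvINVERTED.get? s)).count d : Int) := by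
  rw [List.count_filterMap]
  simp only [PySem.Set.len, PySem.Set.inter]
  rw [← List.countP_eq_length_filter]
  congr 1
  exact List.countP_congr (fun x _ => by rw [PySem.Set.contains_iff, beq_iff_eq, pv_get_inv x d K h])

theorem pv_keysA (S : List String) : (pvScoresA S).keys = pvDOMAINS := by
  rw [pvScoresA, PySem.Dict.keys_foldl_insert_key]
  decide

theorem pv_keys1 (S : List String) : (pvScores1 S).keys = pvDOMAINS := by
  rw [pvScores1, PySem.Dict.keys_foldl_modify]
  rw [show pvScores0.keys = pvDOMAINS from by decide]
  apply pv_set_update_id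
  intro x hx
  obtain ⟨s, _, hs⟩ := List.mem_filterMap.mp hx
  rw [PySem.Set.contains_iff]
  exact pv_inv_val_mem s x hs

theorem pv_getD1 (S : List String) (k : String) (hk : k ∈ pvDOMAINS) :
    (pvScores1 S).getD k 0 = ((S.filterMap (fun s => pvINVERTED.get? s)).count k : Int) := by
  rw [pvScores1, PySem.Dict.getD_foldl_modify_add_one]
  have h0 : pvScores0.getD k 0 = 0 := by fin_cases hk <;> decide
  rw [h0, zero_add]

theorem pv_keys_bonus_fold (S : List String) (l : List String) (d : PySem.Dict String Int)
    (hd : d.keys = pvDOMAINS) :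
    (l.foldl (fun rs term => if S.contains term then rs.modify "Civil Engineer" 0 (· + 2) else rs) d).keys = pvDOMAINS := by
  induction l generalizing d with
  | nil => exact hd
  | cons t l ih =>
    simp only [List.foldl_cons]
    apply ih
    by_cases hc : S.contains t
    · have hcd : d.contains "Civil Engineer" = true := by
        rw [PySem.Dict.contains_iff_mem_keys, hd]; decide
      rw [if_pos hc, PySem.Dict.keys_modify, PySem.Dict.keys_insert_of_contains _ _ hcd]
      exact hd
    · rw [if_neg hc]; exact hd

theorem pv_keys2 (S : List String) : (pvScores2 S).keys = pvDOMAINS :=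
  pv_keys_bonus_fold S pvCIVIL_BONUS (pvScores1 S) (pv_keys1 S)

theorem pv_getD2_noncivil (S : List String) (k : String) (hk : k ≠ "Civil Engineer") :
    (pvScores2 S).getD k 0 = (pvScores1 S).getD k 0 := by
  rw [pvScores2]
  simp only [pvCIVIL_BONUS, List.foldl_cons, List.foldl_nil,
    apply_ite (fun d : PySem.Dict String Int => d.getD k 0), PySem.Dict.getD_modify, if_neg hk, ite_self]

theorem pv_getD2_civil (S : List String) :
    (pvScores2 S).getD "Civil Engineer" 0 =
      pvCIVIL_BONUS.foldl (fun mc t => if S.contains t then mc + 2 else mc)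
        ((pvScores1 S).getD "Civil Engineer" 0) := by
  rw [pvScores2]
  simp only [pvCIVIL_BONUS, List.foldl_cons, List.foldl_nil,
    apply_ite (fun d : PySem.Dict String Int => d.getD "Civil Engineer" 0), PySem.Dict.getD_modify]
  split_ifs <;> ring

-- max(…, key=…) looks at the key function only on the list's members.
theorem pv_max?_congr {α κ : Type} [LT κ] [DecidableLT κ] (l : List α) (f g : α → κ)
    (h : ∀ x ∈ l, f x = g x) : PySem.List.max? l f = PySem.List.max? l g := by
  unfold PySem.List.max?
  suffices haux : ∀ (acc : Option α), (∀ m, acc = some m → f m = g m) →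
      l.foldl (fun acc x => match acc with
        | none => some x
        | some m => if f m < f x then some x else some m) acc =
      l.foldl (fun acc x => match acc with
        | none => some x
        | some m => if g m < g x then some x else some m) acc by
    exact haux none (by intro m hm; cases hm)
  induction l with
  | nil => intro acc _; rfl
  | cons x l ih =>
    intro acc hacc
    have hx : f x = g x := h x (List.mem_cons_self)
    have ihx := ih (fun y hy => h y (List.mem_cons_of_mem _ hy))
    simp only [List.foldl_cons]
    cases acc with
    | none => exact ihx (some x) (by intro m hm; cases hm; exact hx)
    | some m =>
      have hm : f m = g m := hacc m rfl
      have e1 : (match some m with | none => some x | some m => if f m < f x then some x else some m)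
          = (if f m < f x then some x else some m) := rfl
      have e2 : (match some m with | none => some x | some m => if g m < g x then some x else some m)
          = (if g m < g x then some x else some m) := rfl
      rw [e1, e2, show (if f m < f x then some x else some m) = (if g m < g x then some x else some m) from by
        rw [hx, hm]]
      apply ihx
      intro y hy
      split at hy <;> (cases hy; first | exact hx | exact hm)

set_option maxRecDepth 20000 in
set_option maxHeartbeats 4000000 in
theorem pv_values_eq (S : List String) :
    ∀ k ∈ pvDOMAINS, (pvScoresA S).getD k 0 = (pvScores2 S).getD k 0 := by
  intro k hk
  fin_cases hk
  · rw [pv_getD2_noncivil S _ (by decide), pv_getD1 S _ (by decide),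
      ← pv_count_inter S "Computer Science" ["python", "machine learning", "java", "sql", "web development", "aws"] (by decide)]
    simp [pvScoresA, pvDOMAIN_ROLES, pvAval, PySem.Dict.getD_insert_self, PySem.Dict.getD_insert_of_ne]
  · rw [pv_getD2_noncivil S _ (by decide), pv_getD1 S _ (by decide),
      ← pv_count_inter S "Mechanical Engineer" ["solidworks", "autocad", "thermodynamics", "hvac", "fea", "cam"] (by decide)]
    simp [pvScoresA, pvDOMAIN_ROLES, pvAval, PySem.Dict.getD_insert_self, PySem.Dict.getD_insert_of_ne]
  · rw [pv_getD2_noncivil S _ (by decide), pv_getD1 S _ (by decide),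
      ← pv_count_inter S "Electrical Engineer" ["matlab", "arduino", "circuit", "simulink", "vhdl", "electronics"] (by decide)]
    simp [pvScoresA, pvDOMAIN_ROLES, pvAval, PySem.Dict.getD_insert_self, PySem.Dict.getD_insert_of_ne]
  · rw [pv_getD2_civil, pv_getD1 S _ (by decide),
      ← pv_count_inter S "Civil Engineer" ["staad pro", "etabs", "revit", "civil 3d", "site engineering", "autocad civil"] (by decide)]
    simp [pvScoresA, pvDOMAIN_ROLES, pvAval, pvCIVIL_BONUS, PySem.Set.contains,
      PySem.Dict.getD_insert_self, PySem.Dict.getD_insert_of_ne]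
  · rw [pv_getD2_noncivil S _ (by decide), pv_getD1 S _ (by decide),
      ← pv_count_inter S "Biotech / Pharma" ["cell culture", "pcr", "genomics", "clinical trials"] (by decide)]
    simp [pvScoresA, pvDOMAIN_ROLES, pvAval, PySem.Dict.getD_insert_self, PySem.Dict.getD_insert_of_ne]
  · rw [pv_getD2_noncivil S _ (by decide), pv_getD1 S _ (by decide),
      ← pv_count_inter S "Business Analyst / Manager" ["finance", "marketing", "project management", "business analysis"] (by decide)]
    simp [pvScoresA, pvDOMAIN_ROLES, pvAval, PySem.Dict.getD_insert_self, PySem.Dict.getD_insert_of_ne]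
  · rw [pv_getD2_noncivil S _ (by decide), pv_getD1 S _ (by decide),
      ← pv_count_inter S "Lawyer / Legal Professional" ["litigation", "contract law", "corporate law", "intellectual property", "criminal law", "civil law", "legal research", "legal writing", "arbitration"] (by decide)]
    simp [pvScoresA, pvDOMAIN_ROLES, pvAval, PySem.Dict.getD_insert_self, PySem.Dict.getD_insert_of_ne]
  · rw [pv_getD2_noncivil S _ (by decide), pv_getD1 S _ (by decide),
      ← pv_count_inter S "Doctor / Medical Professional" ["mbbs", "md", "residency", "clinical", "diagnosis", "surgery", "medical practice", "treatment"] (by decide)]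
    simp [pvScoresA, pvDOMAIN_ROLES, pvAval, PySem.Dict.getD_insert_self]

theorem pv_core (S : List String) :
    (PySem.List.max? (pvScoresA S).keys (fun k => (pvScoresA S).getD k 0)).getD "" =
    (PySem.List.max? (pvScores2 S).keys (fun k => (pvScores2 S).getD k 0)).getD "" := by
  rw [pv_keysA, pv_keys2,
    pv_max?_congr pvDOMAINS (fun k => (pvScoresA S).getD k 0) (fun k => (pvScores2 S).getD k 0)
      (pv_values_eq S)]

-- ===== VERDICT (by name: the statement is the Claim_ definition above) =====
theorem predict_role_spec : Claim_equal_predict_role := by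
  intro skills _
  unfold Spec_predict_role
  simp only [predict_role, predict_role_alt, PySem.List.dedup_eq_ofList]
  exact pv_core (PySem.Set.ofList skills)
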